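-- pv_equiv track=rewrite | github.com/leejh0820/conding_test | 프로그래머스/1/42862. 체육복/체육복.py | solution
-- ===== SOURCE A (Python) =====
-- def solution(n, lost, reserve):
--
--     actual_reserve = set(reserve) - set(lost)
--     actual_lost = set(lost) - set(reserve)
--
--     for i in sorted(actual_reserve):
--         if i - 1 in actual_lost:
--             actual_lost.remove(i - 1)
--         elif i + 1 in actual_lost:
--             actual_lost.remove(i + 1)
--
--     return n - len(actual_lost)
-- ===== SOURCE B (Python) =====
-- def solution(n, lost, reserve):
--     # Two-pointer sweep over the two sorted deduplicated lists instead of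
--     # iterating the reserve set and mutating the lost set.
--     L = sorted(set(lost) - set(reserve))
--     R = sorted(set(reserve) - set(lost))
--     i = j = matched = 0
--     while i < len(L) and j < len(R):
--         d = R[j] - L[i]
--         if -1 <= d <= 1:
--             matched += 1
--             i += 1
--             j += 1
--         elif d > 1:
--             i += 1
--         else:
--             j += 1
--     return n - (len(L) - matched)
-- ===== Notes on version B (the rewrite author's own statement) =====
-- stated objective: alternative
-- what changed: Replaces A's iterate-the-reserve-set-and-mutate-the-lost-set greedy by a single two-pointer merge over the two sorted deduplicated lists, counting matches instead of removing set elements.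
import Mathlib
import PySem

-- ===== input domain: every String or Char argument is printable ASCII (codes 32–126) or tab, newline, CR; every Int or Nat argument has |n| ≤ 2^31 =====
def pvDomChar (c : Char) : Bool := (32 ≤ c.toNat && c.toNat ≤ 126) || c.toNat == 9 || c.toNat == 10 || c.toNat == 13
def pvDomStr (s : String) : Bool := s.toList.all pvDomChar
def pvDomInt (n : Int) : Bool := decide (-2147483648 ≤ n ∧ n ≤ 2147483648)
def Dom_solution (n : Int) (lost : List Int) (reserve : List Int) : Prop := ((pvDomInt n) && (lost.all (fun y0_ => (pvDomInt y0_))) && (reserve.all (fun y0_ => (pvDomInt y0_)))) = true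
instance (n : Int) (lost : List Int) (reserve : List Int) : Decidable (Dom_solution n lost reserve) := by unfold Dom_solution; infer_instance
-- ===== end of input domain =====

-- B replaces A's iterate-reserve-and-mutate-a-set greedy by a two-pointer merge
-- of the two sorted deduplicated lists (objective: alternative algorithm).

-- ===== PORT A =====
-- body of A's loop; Python's set.remove is exact as discard here because it is
-- only called under the membership test of the same branch
def solStep (s : PySem.Set Int) (i : Int) : PySem.Set Int :=
  if PySem.Set.contains s (i - 1) then PySem.Set.discard s (i - 1)
  else if PySem.Set.contains s (i + 1) then PySem.Set.discard s (i + 1)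
  else s

def solution (n : Int) (lost : List Int) (reserve : List Int) : Int :=
  let actualReserve : PySem.Set Int := PySem.Set.diff (PySem.Set.ofList reserve) (PySem.Set.ofList lost)
  let actualLost : PySem.Set Int := PySem.Set.diff (PySem.Set.ofList lost) (PySem.Set.ofList reserve)
  let finalLost := (PySem.List.sorted actualReserve (fun x => x) false).foldl solStep actualLost
  n - PySem.Set.len finalLost

-- ===== PORT B =====
-- the while loop of Source B: the two pointers become structural recursion on the two suffixes
def tpMatch : List Int → List Int → Int
  | [], _ => 0
  | _ :: _, [] => 0
  | l :: ls, r :: rs =>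
    let d := r - l
    if -1 ≤ d ∧ d ≤ 1 then 1 + tpMatch ls rs
    else if 1 < d then tpMatch ls (r :: rs)
    else tpMatch (l :: ls) rs
termination_by L R => L.length + R.length

def solution_alt (n : Int) (lost : List Int) (reserve : List Int) : Int :=
  let L := PySem.List.sorted (PySem.Set.diff (PySem.Set.ofList lost) (PySem.Set.ofList reserve)) (fun x => x) false
  let R := PySem.List.sorted (PySem.Set.diff (PySem.Set.ofList reserve) (PySem.Set.ofList lost)) (fun x => x) false
  n - ((L.length : Int) - tpMatch L R)

-- ===== PRECONDITION & SPEC =====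
def Spec_solution (n : Int) (lost : List Int) (reserve : List Int) (out : Int) : Prop := out = solution_alt n lost reserve
instance (n : Int) (lost : List Int) (reserve : List Int) (out : Int) : Decidable (Spec_solution n lost reserve out) := by unfold Spec_solution; infer_instance

-- ===== CLAIM (what is proved, stated in full; the proofs are below) =====
def Claim_equal_solution : Prop := ∀ (n : Int) (lost : List Int) (reserve : List Int), Dom_solution n lost reserve → Spec_solution n lost reserve (solution n lost reserve)

-- ===== LEMMAS AND PROOFS =====

lemma solStep_perm {s s' : List Int} (h : s.Perm s') (r : Int) :
    (solStep s r).Perm (solStep s' r) := by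
  have h1 : PySem.Set.contains s (r - 1) = PySem.Set.contains s' (r - 1) := by
    simp [PySem.Set.contains, List.contains_eq_mem, h.mem_iff]
  have h2 : PySem.Set.contains s (r + 1) = PySem.Set.contains s' (r + 1) := by
    simp [PySem.Set.contains, List.contains_eq_mem, h.mem_iff]
  unfold solStep
  rw [h1, h2]
  unfold PySem.Set.discard
  split_ifs with hc1 hc2
  · exact h.filter _
  · exact h.filter _
  · exact h

lemma foldA_perm {s s' : List Int} (h : s.Perm s') (R : List Int) :
    (R.foldl solStep s).Perm (R.foldl solStep s') := by
  induction R generalizing s s' with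
  | nil => exact h
  | cons r rs ih => exact ih (solStep_perm h r)

lemma solStep_nil (r : Int) : solStep [] r = [] := by
  simp [solStep, PySem.Set.contains]

lemma foldA_nil (R : List Int) : R.foldl solStep [] = [] := by
  induction R with
  | nil => rfl
  | cons r rs ih => simp [solStep_nil, ih]

lemma solStep_cons {l r : Int} (S : List Int) (h : l + 1 < r) :
    solStep (l :: S) r = l :: solStep S r := by
  have h1 : ¬ (r - 1 = l) := by omega
  have h2 : ¬ (r + 1 = l) := by omega
  have h1' : (l == r - 1) = false := by simp; omega
  have h2' : (l == r + 1) = false := by simp; omega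
  simp only [solStep, PySem.Set.contains, PySem.Set.discard, List.contains_eq_mem,
    List.mem_cons, h1, h2, false_or, decide_eq_true_eq, List.filter_cons, h1', h2',
    Bool.not_false, if_true]
  split_ifs with hc1 hc2 <;> rfl

-- a lost student smaller than every remaining reserve minus one survives untouched
lemma foldA_skip {l : Int} (S R : List Int) (h : ∀ r ∈ R, l + 1 < r) :
    R.foldl solStep (l :: S) = l :: R.foldl solStep S := by
  induction R generalizing S with
  | nil => rfl
  | cons r rs ih =>
    rw [List.foldl_cons, solStep_cons S (h r (List.mem_cons_self)),
      ih _ (fun r' hr' => h r' (List.mem_cons_of_mem _ hr')), List.foldl_cons]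

-- a reserve smaller than every remaining lost minus one lends to nobody
lemma tpMatch_cons (l r : Int) (ls rs : List Int) :
    tpMatch (l :: ls) (r :: rs) =
      if -1 ≤ r - l ∧ r - l ≤ 1 then 1 + tpMatch ls rs
      else if 1 < r - l then tpMatch ls (r :: rs)
      else tpMatch (l :: ls) rs := by
  rw [tpMatch]

lemma solStep_low {r : Int} (S : List Int) (h : ∀ x ∈ S, r + 1 < x) :
    solStep S r = S := by
  have h1 : r - 1 ∉ S := fun hm => absurd (h _ hm) (by omega)
  have h2 : r + 1 ∉ S := fun hm => absurd (h _ hm) (by omega)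
  simp [solStep, PySem.Set.contains, List.contains_eq_mem, h1, h2]

theorem main_lemma (L R : List Int) (hL : L.Pairwise (· < ·)) (hR : R.Pairwise (· < ·))
    (hd : ∀ l ∈ L, l ∉ R) :
    ((R.foldl solStep L).length : Int) = (L.length : Int) - tpMatch L R := by
  match L, R with
  | [], R => simp [foldA_nil, tpMatch]
  | l :: ls, [] => simp [tpMatch]
  | l :: ls, r :: rs =>
    rw [List.pairwise_cons] at hL hR
    obtain ⟨hlls, hLtail⟩ := hL
    obtain ⟨hrrs, hRtail⟩ := hR
    have hlr : l ≠ r := fun he => hd l List.mem_cons_self (he ▸ List.mem_cons_self)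
    by_cases hc : -1 ≤ r - l ∧ r - l ≤ 1
    · have hcase : r = l + 1 ∨ r = l - 1 := by omega
      have hnotin : l ∉ ls := fun hm => lt_irrefl l (hlls l hm)
      have hfil : List.filter (fun y => !y == l) ls = ls :=
        List.filter_eq_self.mpr (fun y hy => by simp; exact (ne_of_gt (hlls y hy)))
      have hstep : solStep (l :: ls) r = ls := by
        rcases hcase with he | he
        · have : r - 1 = l := by omega
          simp [solStep, PySem.Set.contains, PySem.Set.discard, List.contains_eq_mem,
            this, hfil]
        · have hne : r - 1 ∉ l :: ls := by
            intro hm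
            rcases List.mem_cons.mp hm with h' | h'
            · omega
            · exact absurd (hlls _ h') (by omega)
          have : r + 1 = l := by omega
          simp [solStep, PySem.Set.contains, List.contains_eq_mem, hne, this,
            PySem.Set.discard, hfil]
      rw [List.foldl_cons, hstep]
      have IH := main_lemma ls rs hLtail hRtail
        (fun x hx => fun hxr => hd x (List.mem_cons_of_mem _ hx) (List.mem_cons_of_mem _ hxr))
      rw [IH, tpMatch_cons, if_pos hc]
      push_cast [List.length_cons]
      ring
    · by_cases hgt : 1 < r - l
      · have hall : ∀ r' ∈ r :: rs, l + 1 < r' := by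
          intro r' h'
          rcases List.mem_cons.mp h' with h' | h'
          · omega
          · have := hrrs r' h'; omega
        rw [foldA_skip _ _ hall, List.length_cons]
        have IH := main_lemma ls (r :: rs) hLtail (List.pairwise_cons.mpr ⟨hrrs, hRtail⟩)
          (fun x hx => hd x (List.mem_cons_of_mem _ hx))
        rw [tpMatch_cons, if_neg hc, if_pos hgt]
        push_cast [List.length_cons] at IH ⊢
        omega
      · have hlow : solStep (l :: ls) r = l :: ls := by
          apply solStep_low
          intro x hx
          rcases List.mem_cons.mp hx with h' | h'
          · omega
          · have := hlls x h'; omega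
        rw [List.foldl_cons, hlow]
        have IH := main_lemma (l :: ls) rs (List.pairwise_cons.mpr ⟨hlls, hLtail⟩) hRtail
          (fun x hx => fun hxr => hd x hx (List.mem_cons_of_mem _ hxr))
        rw [IH, tpMatch_cons, if_neg hc, if_neg hgt]
termination_by L.length + R.length
decreasing_by all_goals (simp [List.length_cons]; try omega)

-- ===== VERDICT (by name: the statement is the Claim_ definition above) =====
theorem solution_spec : Claim_equal_solution := by
  intro n lost reserve _
  unfold Spec_solution
  simp only [solution, solution_alt]
  have key : ∀ (A B : List Int),
      PySem.Set.len ((PySem.List.sorted (PySem.Set.diff (PySem.Set.ofList B) (PySem.Set.ofList A)) (fun x => x) false).foldl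
        solStep (PySem.Set.diff (PySem.Set.ofList A) (PySem.Set.ofList B)))
      = ((PySem.List.sorted (PySem.Set.diff (PySem.Set.ofList A) (PySem.Set.ofList B)) (fun x => x) false).length : Int)
        - tpMatch (PySem.List.sorted (PySem.Set.diff (PySem.Set.ofList A) (PySem.Set.ofList B)) (fun x => x) false)
                  (PySem.List.sorted (PySem.Set.diff (PySem.Set.ofList B) (PySem.Set.ofList A)) (fun x => x) false) := by
    intro A B
    set S0 : List Int := PySem.Set.diff (PySem.Set.ofList A) (PySem.Set.ofList B) with hS0
    set R0 : List Int := PySem.Set.diff (PySem.Set.ofList B) (PySem.Set.ofList A) with hR0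
    set L : List Int := PySem.List.sorted S0 (fun x => x) false with hLdef
    set R : List Int := PySem.List.sorted R0 (fun x => x) false with hRdef
    have hpermL : L.Perm S0 := PySem.List.sorted_perm S0 (fun x => x) false
    have hnodupS0 : S0.Nodup := (PySem.Set.nodup_ofList A).filter _
    have hnodupR0 : R0.Nodup := (PySem.Set.nodup_ofList B).filter _
    have hLnd : L.Nodup := hpermL.nodup_iff.mpr hnodupS0
    have hRnd : R.Nodup := (PySem.List.sorted_perm R0 (fun x => x) false).nodup_iff.mpr hnodupR0
    have hLlt : L.Pairwise (· < ·) := by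
      have h1 : L.Pairwise (· ≤ ·) := PySem.List.sorted_pairwise S0 (fun x => x)
      exact (h1.and hLnd).imp (fun h => lt_of_le_of_ne h.1 h.2)
    have hRlt : R.Pairwise (· < ·) := by
      have h1 : R.Pairwise (· ≤ ·) := PySem.List.sorted_pairwise R0 (fun x => x)
      exact (h1.and hRnd).imp (fun h => lt_of_le_of_ne h.1 h.2)
    have hdisj : ∀ l ∈ L, l ∉ R := by
      intro x hx hxR
      have hxS0 : x ∈ S0 := hpermL.mem_iff.mp hx
      have hxR0 : x ∈ R0 := (PySem.List.sorted_perm R0 (fun x => x) false).mem_iff.mp hxR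
      rw [hS0] at hxS0
      rw [hR0] at hxR0
      simp [PySem.Set.diff, List.mem_filter, PySem.Set.contains, List.contains_eq_mem] at hxS0 hxR0
      exact hxS0.2 hxR0.1
    have hpermFold : (R.foldl solStep S0).Perm (R.foldl solStep L) :=
      foldA_perm hpermL.symm R
    have := main_lemma L R hLlt hRlt hdisj
    rw [PySem.Set.len, hpermFold.length_eq, this]
  rw [key lost reserve]
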